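-- pv_equiv track=rewrite | github.com/MrBrantCode/unitest_baseline | mut_generate/mist_train_cf/cf_14035/solution.py | max_prime_subarray_sum
-- ===== SOURCE A (Python) =====
-- def is_prime(n):
--     """Check if a number is prime."""
--     if n < 2:
--         return False
--     for i in range(2, int(n**0.5) + 1):
--         if n % i == 0:
--             return False
--     return True
--
-- def max_prime_subarray_sum(arr, k):
--     """Return the maximum sum of a subarray of length k that consists only of prime numbers."""
--     primes = [num for num in arr if is_prime(num)]
--     if len(primes) < k:
--         return 0
--
--     max_sum = 0
--     window_sum = sum(primes[:k])
--
--     max_sum = max(max_sum, window_sum)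
--
--     for i in range(k, len(primes)):
--         window_sum = window_sum - primes[i - k] + primes[i]
--         max_sum = max(max_sum, window_sum)
--
--     return max_sum
-- ===== SOURCE B (Python) =====
-- def is_prime(n):
--     """Check if a number is prime."""
--     if n < 2:
--         return False
--     for i in range(2, int(n**0.5) + 1):
--         if n % i == 0:
--             return False
--     return True
--
-- def max_prime_subarray_sum(arr, k):
--     """Return the maximum sum of a subarray of length k that consists only of prime numbers."""
--     primes = [num for num in arr if is_prime(num)]
--     if len(primes) < k:
--         return 0
--     prefix = [0]
--     s = 0
--     for p in primes:
--         s += p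
--         prefix.append(s)
--     best = 0
--     for i in range(len(primes) - k + 1):
--         best = max(best, prefix[i + k] - prefix[i])
--     return best
-- ===== Notes on version B (the rewrite author's own statement) =====
-- stated objective: alternative
-- what changed: B replaces A's incremental sliding-window sum maintenance with a prefix-sum table built in one pass followed by a single pass taking the max over window differences P[i+k]-P[i].
import Mathlib
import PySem

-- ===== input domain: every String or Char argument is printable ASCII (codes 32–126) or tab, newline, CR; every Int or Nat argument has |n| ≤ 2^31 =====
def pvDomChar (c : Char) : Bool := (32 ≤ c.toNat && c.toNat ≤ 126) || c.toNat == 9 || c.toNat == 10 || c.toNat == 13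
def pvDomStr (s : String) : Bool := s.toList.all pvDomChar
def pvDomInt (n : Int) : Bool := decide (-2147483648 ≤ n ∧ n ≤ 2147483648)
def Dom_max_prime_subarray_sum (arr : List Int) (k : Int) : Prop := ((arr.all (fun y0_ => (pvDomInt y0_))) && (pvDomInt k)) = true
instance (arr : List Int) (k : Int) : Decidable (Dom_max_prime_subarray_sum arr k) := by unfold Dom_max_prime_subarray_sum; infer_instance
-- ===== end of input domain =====

-- B replaces A's incremental sliding-window sum with a prefix-sum table and one window pass
-- (objective: alternative decomposition, same asymptotic cost).

-- ===== PORT A =====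
-- shared module helper is_prime (both Python files define it identically).
-- int(n**0.5) is ported as Nat.sqrt n.toNat: exact for 2 ≤ n ≤ 2^31 (the Dom bound), where the
-- float square root is within far less than the gap to the nearest integer boundary.
def isPrime (n : Int) : Bool :=
  if n < 2 then false
  else (PySem.List.pyRange 2 ((Nat.sqrt n.toNat : Int) + 1) 1).all
         (fun i => PySem.Int.mod n i != 0)

def max_prime_subarray_sum (arr : List Int) (k : Int) : Int :=
  let primes := arr.filter isPrime
  if (primes.length : Int) < k then 0
  else
    let window_sum := (PySem.List.slice primes none (some k)).sum
    let max_sum := max 0 window_sum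
    let st := (PySem.List.pyRange k (primes.length : Int) 1).foldl
      (fun (st : Int × Int) i =>
        let ws := st.1 - PySem.List.pyGetD primes (i - k) 0 + PySem.List.pyGetD primes i 0
        (ws, max st.2 ws)) (window_sum, max_sum)
    st.2

-- ===== PORT B =====
def max_prime_subarray_sum_alt (arr : List Int) (k : Int) : Int :=
  let primes := arr.filter isPrime
  if (primes.length : Int) < k then 0
  else
    let pr := primes.foldl
      (fun (st : List Int × Int) p => (st.1 ++ [st.2 + p], st.2 + p)) ([0], 0)
    (PySem.List.pyRange 0 ((primes.length : Int) - k + 1) 1).foldl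
      (fun best i =>
        max best (PySem.List.pyGetD pr.1 (i + k) 0 - PySem.List.pyGetD pr.1 i 0)) 0

-- ===== PRECONDITION & SPEC =====
-- Pre_ excludes k < 0, on which A always raises IndexError (its window update reads primes[i-k]
-- past the end of the filtered list; the empty filtered list raises too).
def Pre_max_prime_subarray_sum (arr : List Int) (k : Int) : Prop := 0 ≤ k
instance (arr : List Int) (k : Int) : Decidable (Pre_max_prime_subarray_sum arr k) := by
  unfold Pre_max_prime_subarray_sum; infer_instance

def pvWitness_max_prime_subarray_sum : List Int × Int := ([2, 3, 4, 5], 2)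

def Spec_max_prime_subarray_sum (arr : List Int) (k : Int) (out : Int) : Prop := out = max_prime_subarray_sum_alt arr k
instance (arr : List Int) (k : Int) (out : Int) : Decidable (Spec_max_prime_subarray_sum arr k out) := by unfold Spec_max_prime_subarray_sum; infer_instance

-- ===== CLAIM (what is proved, stated in full; the proofs are below) =====
def Claim_equal_max_prime_subarray_sum : Prop := ∀ (arr : List Int) (k : Int), Dom_max_prime_subarray_sum arr k → Pre_max_prime_subarray_sum arr k → Spec_max_prime_subarray_sum arr k (max_prime_subarray_sum arr k)

-- ===== LEMMAS AND PROOFS =====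

/-- prefix sum of the first `j` elements -/
def pvP (l : List Int) (j : Nat) : Int := (l.take j).sum

/-- sum of the length-`kn` window starting at `i` -/
def pvW (l : List Int) (kn : Nat) (i : Nat) : Int := pvP l (i + kn) - pvP l i

theorem pvP_succ (l : List Int) (j : Nat) (h : j < l.length) :
    pvP l (j + 1) = pvP l j + l.getD j 0 := by
  simp [pvP, List.sum_take_succ l j h, List.getD_eq_getElem?_getD, List.getElem?_eq_getElem h]

theorem pvW_step (l : List Int) (kn j : Nat) (h : j + kn < l.length) :
    pvW l kn j - l.getD j 0 + l.getD (j + kn) 0 = pvW l kn (j + 1) := by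
  have h1 : j < l.length := by omega
  have e1 := pvP_succ l (j + kn) h
  have e2 := pvP_succ l j h1
  simp only [pvW]
  have h2 : j + 1 + kn = j + kn + 1 := by omega
  rw [h2, e1, e2]
  ring

theorem buildPrefix (l : List Int) (acc : List Int) (s : Int) :
    l.foldl (fun (st : List Int × Int) p => (st.1 ++ [st.2 + p], st.2 + p)) (acc, s)
    = (acc ++ (List.range l.length).map (fun j => s + (l.take (j + 1)).sum), s + l.sum) := by
  induction l generalizing acc s with
  | nil => simp
  | cons p t ih =>
    simp only [List.foldl_cons, ih]
    refine Prod.ext ?_ ?_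
    · simp [List.range_succ_eq_map, List.map_map, Function.comp, add_assoc, Nat.succ_eq_add_one]
    · simp [add_assoc]

theorem prefix_eq (l : List Int) :
    (l.foldl (fun (st : List Int × Int) p => (st.1 ++ [st.2 + p], st.2 + p)) ([0], 0)).1
    = (List.range (l.length + 1)).map (pvP l) := by
  rw [buildPrefix]
  simp [List.range_succ_eq_map, List.map_map, Function.comp, pvP, Nat.succ_eq_add_one]

theorem getD_map_range' (f : Nat → Int) (m j : Nat) (h : j < m) :
    ((List.range m).map f).getD j 0 = f j := by
  simp [List.getD_eq_getElem?_getD, h]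

/-- invariant of A's sliding-window loop, processed back-to-front over `List.range` -/
theorem Aloop (l : List Int) (kn : Nat) :
    ∀ (cnt : Nat) (ms : Int), cnt + kn ≤ l.length →
    (List.range cnt).foldl (fun (st : Int × Int) t =>
        (st.1 - l.getD t 0 + l.getD (kn + t) 0,
         max st.2 (st.1 - l.getD t 0 + l.getD (kn + t) 0)))
      (pvP l kn, ms)
    = (pvW l kn cnt, (List.range cnt).foldl (fun b t => max b (pvW l kn (t + 1))) ms) := by
  intro cnt
  induction cnt with
  | zero => intro ms _; simp [pvW, pvP]
  | succ c ih =>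
    intro ms h
    rw [List.range_succ, List.foldl_append, List.foldl_append, ih ms (by omega)]
    simp only [List.foldl_cons, List.foldl_nil]
    have hs : pvW l kn c - l.getD c 0 + l.getD (c + kn) 0 = pvW l kn (c + 1) :=
      pvW_step l kn c (by omega)
    rw [Nat.add_comm kn c, hs]

-- core equivalence on the filtered list
theorem core (primes : List Int) (k : Int) (hk : 0 ≤ k) (hle : k ≤ (primes.length : Int)) :
    (let window_sum := (PySem.List.slice primes none (some k)).sum
     let max_sum := max 0 window_sum
     ((PySem.List.pyRange k (primes.length : Int) 1).foldl
       (fun (st : Int × Int) i =>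
         let ws := st.1 - PySem.List.pyGetD primes (i - k) 0 + PySem.List.pyGetD primes i 0
         (ws, max st.2 ws)) (window_sum, max_sum)).2)
    = (let pr := primes.foldl
         (fun (st : List Int × Int) p => (st.1 ++ [st.2 + p], st.2 + p)) ([0], 0)
       (PySem.List.pyRange 0 ((primes.length : Int) - k + 1) 1).foldl
        (fun best i =>
          max best (PySem.List.pyGetD pr.1 (i + k) 0 - PySem.List.pyGetD pr.1 i 0)) 0) := by
  simp only []
  set n := primes.length with hn
  set kn := k.toNat with hknd
  have hkk : k = (kn : Int) := (Int.toNat_of_nonneg hk).symm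
  have hkn : kn ≤ n := by omega
  -- A side
  have hslice : PySem.List.slice primes none (some k) = primes.take kn :=
    PySem.List.slice_to primes hk
  have hcnt : ((n : Int) - k).toNat = n - kn := by omega
  rw [hslice, PySem.List.pyRange_one k (n : Int), hcnt, List.foldl_map]
  have hA1 : ∀ (st : Int × Int) (t : Nat), t ∈ List.range (n - kn) →
      (st.1 - PySem.List.pyGetD primes (k + (t : Int) - k) 0
         + PySem.List.pyGetD primes (k + (t : Int)) 0,
       max st.2 (st.1 - PySem.List.pyGetD primes (k + (t : Int) - k) 0
         + PySem.List.pyGetD primes (k + (t : Int)) 0))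
      = (st.1 - primes.getD t 0 + primes.getD (kn + t) 0,
         max st.2 (st.1 - primes.getD t 0 + primes.getD (kn + t) 0)) := by
    intro st t _
    have e1 : k + (t : Int) - k = (t : Int) := by ring
    have e2 : k + (t : Int) = ((kn + t : Nat) : Int) := by omega
    rw [e1, e2, PySem.List.pyGetD_natCast, PySem.List.pyGetD_natCast]
  rw [PySem.List.foldl_congr_mem _ _ _ _ hA1]
  have hsum : (primes.take kn).sum = pvP primes kn := rfl
  rw [hsum, Aloop primes kn (n - kn) (max 0 (pvP primes kn)) (by omega)]
  -- B side
  rw [prefix_eq primes]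
  have hcnt2 : (n : Int) - k + 1 = ((n - kn + 1 : Nat) : Int) := by omega
  rw [hcnt2, PySem.List.pyRange_zero_natCast, List.foldl_map]
  have hB1 : ∀ (b : Int) (t : Nat), t ∈ List.range (n - kn + 1) →
      max b (PySem.List.pyGetD ((List.range (n + 1)).map (pvP primes)) ((t : Int) + k) 0
             - PySem.List.pyGetD ((List.range (n + 1)).map (pvP primes)) (t : Int) 0)
      = max b (pvW primes kn t) := by
    intro b t ht
    have ht' : t < n - kn + 1 := List.mem_range.mp ht
    have e2 : (t : Int) + k = ((t + kn : Nat) : Int) := by omega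
    rw [e2, PySem.List.pyGetD_natCast, PySem.List.pyGetD_natCast,
        getD_map_range' (pvP primes) (n + 1) (t + kn) (by omega),
        getD_map_range' (pvP primes) (n + 1) t (by omega)]
    rfl
  rw [PySem.List.foldl_congr_mem _ _ _ _ hB1]
  -- assemble
  have hm : n - kn + 1 = (n - kn) + 1 := rfl
  rw [hm, List.range_succ_eq_map, List.foldl_cons, List.foldl_map]
  have hW0 : pvW primes kn 0 = pvP primes kn := by simp [pvW, pvP]
  rw [hW0]

-- ===== VERDICT (by name: the statement is the Claim_ definition above) =====
theorem max_prime_subarray_sum_spec : Claim_equal_max_prime_subarray_sum := by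
  intro arr k _ hk
  unfold Spec_max_prime_subarray_sum max_prime_subarray_sum max_prime_subarray_sum_alt
  simp only []
  by_cases hlt : ((arr.filter isPrime).length : Int) < k
  · simp [hlt]
  · simp only [hlt, if_false]
    exact core (arr.filter isPrime) k hk (by omega)
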